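-- pv_equiv track=rewrite | github.com/ryosuke-terasaka1/Estimated_app | Documents/Programming/exam/geniee/最悪のパスワード/script.py | search_min_pass_length
-- ===== SOURCE A (Python) =====
-- symbol_set = {'@', '%', '$'}
--
-- def search_min_pass_length(string: str) -> int:
--
--     # 最小値を見つけるので初期値を大きく設定する
--     pass_length = 1000000
--
--     # 初めの文字をstring[i], 終わりの文字をstring[j]として条件を満たす文字列を探索
--     for i in range(len(string)):
--         is_more_5_kind_str = False
--         is_only_str = True
--         is_symbol = False
--         string_set = set()
--
--         # 最低文字数のパスワードが決まった場合、探索を終了する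
--         if pass_length == 6:
--             break
--
--         for j in range(i, len(string)):
--
--             # これまでに出力したパスワード以上の長さになった時点で探索を終了する
--             if pass_length <= j - i + 1:
--                 break
--
--             if string[j] not in string_set and string[j] not in symbol_set:
--                 string_set.add(string[j])
--
--             # 条件を満たすかどうかの判定
--             if len(string_set) >= 5:
--                 is_more_5_kind_str = True
--             if string[j] in symbol_set:
--                 is_symbol = True
--             if not (string[j].islower() or string[j] in symbol_set):
--                 is_only_str = False
--
--             # 条件を全て満たした場合にパスワードの長さを更新し、開始地点(string[i])を変える
--             if (is_symbol and is_only_str and is_more_5_kind_str):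
--                 pass_length = min(pass_length, (j - i + 1))
--                 break
--
--     return pass_length
-- ===== SOURCE B (Python) =====
-- symbol_set = {'@', '%', '$'}
--
-- def search_min_pass_length(string: str) -> int:
--     # sliding window: one left pointer, letter counts and symbol count of the
--     # current all-(lowercase|symbol) window; reset on any other character
--     best = 1000000
--     left = 0
--     counts = {}
--     sym = 0
--     for right in range(len(string)):
--         c = string[right]
--         if not (c.islower() or c in symbol_set):
--             counts = {}
--             sym = 0
--             left = right + 1
--             continue
--         if c in symbol_set:
--             sym += 1
--         else:
--             counts[c] = counts.get(c, 0) + 1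
--         while sym >= 1 and len(counts) >= 5:
--             best = min(best, right - left + 1)
--             d = string[left]
--             if d in symbol_set:
--                 sym -= 1
--             else:
--                 counts[d] = counts[d] - 1
--                 if counts[d] == 0:
--                     del counts[d]
--             left += 1
--     return best
-- ===== Notes on version B (the rewrite author's own statement) =====
-- stated objective: faster
-- what changed: Replaced the restart-from-every-start nested scan (with pruning breaks) by a single-pass sliding-window two-pointer that keeps letter counts and a symbol count of the current all-(lowercase|symbol) window and resets on any other character.
import Mathlib
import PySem

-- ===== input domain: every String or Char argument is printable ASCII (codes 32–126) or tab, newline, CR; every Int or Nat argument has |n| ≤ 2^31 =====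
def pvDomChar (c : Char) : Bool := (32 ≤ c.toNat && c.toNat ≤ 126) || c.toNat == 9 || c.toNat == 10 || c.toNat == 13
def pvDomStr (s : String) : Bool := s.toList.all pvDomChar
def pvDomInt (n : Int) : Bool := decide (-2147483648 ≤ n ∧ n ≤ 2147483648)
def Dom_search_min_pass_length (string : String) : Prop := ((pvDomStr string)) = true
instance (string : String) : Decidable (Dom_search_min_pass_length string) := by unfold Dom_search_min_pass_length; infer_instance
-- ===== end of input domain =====

-- B replaces A's restart-from-every-start nested scan by a one-pass sliding-window
-- two-pointer (objective: faster; a timing run measured the speed-up).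

-- module-level constant symbol_set = {'@', '%', '$'} (shared by both Pythons)
def pvSymSet : PySem.Set Char := PySem.Set.ofList ['@', '%', '$']

-- ===== PORT A =====
-- inner 'for j in range(i, len(string))' loop of A, with its two breaks
def pvInnerA (cs : List Char) (i : Nat) (p : Int) (j : Nat)
    (st : PySem.Set Char) (more5 onlyS sym : Bool) : Int :=
  if h : j < cs.length then
    if p ≤ (j : Int) - (i : Int) + 1 then p
    else
      let c := cs[j]
      let st' := if !(PySem.Set.contains st c) && !(PySem.Set.contains pvSymSet c) then PySem.Set.add st c else st
      let more5' := if 5 ≤ st'.length then true else more5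
      let sym' := if PySem.Set.contains pvSymSet c then true else sym
      let onlyS' := if !(PySem.Chars.islower c || PySem.Set.contains pvSymSet c) then false else onlyS
      if sym' && onlyS' && more5' then min p ((j : Int) - (i : Int) + 1)
      else pvInnerA cs i p (j + 1) st' more5' onlyS' sym'
  else p
termination_by cs.length - j

-- outer 'for i in range(len(string))' loop of A, with its pass_length == 6 break
def pvOuterA (cs : List Char) (p : Int) (i : Nat) : Int :=
  if i < cs.length then
    if p == 6 then p
    else pvOuterA cs (pvInnerA cs i p i PySem.Set.empty false true false) (i + 1)
  else p
termination_by cs.length - i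

def search_min_pass_length (string : String) : Int :=
  pvOuterA string.toList 1000000 0

-- ===== PORT B =====
-- the 'while sym >= 1 and len(counts) >= 5' shrink loop of B
-- (fuel = right + 1 - left at each call; it only runs while the window is nonempty)
def pvShrinkB (cs : List Char) (right : Nat) :
    Nat → Int → Nat → PySem.Dict Char Int → Int → Int × Nat × PySem.Dict Char Int × Int
  | 0, best, left, counts, sym => (best, left, counts, sym)
  | fuel + 1, best, left, counts, sym =>
    if 1 ≤ sym ∧ 5 ≤ counts.size then
      let best' := min best ((right : Int) - (left : Int) + 1)
      let d := cs.getD left 'a'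
      if PySem.Set.contains pvSymSet d then
        pvShrinkB cs right fuel best' (left + 1) counts (sym - 1)
      else
        let counts1 := counts.insert d (counts.getD d 0 - 1)
        let counts2 := if counts1.getD d 0 == 0 then counts1.erase d else counts1
        pvShrinkB cs right fuel best' (left + 1) counts2 sym
    else (best, left, counts, sym)

-- the 'for right in range(len(string))' loop of B
def pvScanB (cs : List Char) (right : Nat) (best : Int) (left : Nat)
    (counts : PySem.Dict Char Int) (sym : Int) : Int :=
  if h : right < cs.length then
    let c := cs[right]
    if !(PySem.Chars.islower c || PySem.Set.contains pvSymSet c) then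
      pvScanB cs (right + 1) best (right + 1) PySem.Dict.empty 0
    else
      let counts1 := if PySem.Set.contains pvSymSet c then counts else counts.insert c (counts.getD c 0 + 1)
      let sym1 := if PySem.Set.contains pvSymSet c then sym + 1 else sym
      let r := pvShrinkB cs right (right + 1 - left) best left counts1 sym1
      pvScanB cs (right + 1) r.1 r.2.1 r.2.2.1 r.2.2.2
  else best
termination_by cs.length - right

def search_min_pass_length_alt (string : String) : Int :=
  pvScanB string.toList 0 1000000 0 PySem.Dict.empty 0

-- ===== PRECONDITION & SPEC =====
def Spec_search_min_pass_length (string : String) (out : Int) : Prop := out = search_min_pass_length_alt string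
instance (string : String) (out : Int) : Decidable (Spec_search_min_pass_length string out) := by unfold Spec_search_min_pass_length; infer_instance

-- ===== CLAIM (what is proved, stated in full; the proofs are below) =====
def Claim_equal_search_min_pass_length : Prop := ∀ (string : String), Dom_search_min_pass_length string → Spec_search_min_pass_length string (search_min_pass_length string)

-- ===== LEMMAS AND PROOFS =====

-- shared proof-side vocabulary
def pvAllowed (c : Char) : Bool := PySem.Chars.islower c || PySem.Set.contains pvSymSet c
def pvIsSym (c : Char) : Bool := PySem.Set.contains pvSymSet c
-- window of characters at positions i..j-1
def pvW (cs : List Char) (i j : Nat) : List Char := (cs.drop i).take (j - i)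
def pvLet (w : List Char) : List Char := w.filter (fun c => !pvIsSym c)
def pvDst (w : List Char) : Nat := (PySem.Set.ofList (pvLet w)).length
def pvSymCnt (w : List Char) : Int := ((w.filter pvIsSym).length : Int)

-- the password windows the task is about
def pvGood (cs : List Char) (i j : Nat) : Prop :=
  i ≤ j ∧ j < cs.length ∧ (pvW cs i (j + 1)).all pvAllowed = true ∧
    (pvW cs i (j + 1)).any pvIsSym = true ∧ 5 ≤ pvDst (pvW cs i (j + 1))

def pvAch (cs : List Char) (r : Int) : Prop :=
  r = 1000000 ∨ ∃ i j, pvGood cs i j ∧ r = (j : Int) - (i : Int) + 1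

def pvIsMin (cs : List Char) (r : Int) : Prop :=
  r ≤ 1000000 ∧ (∀ i j, pvGood cs i j → r ≤ (j : Int) - (i : Int) + 1) ∧ pvAch cs r

lemma pvIsMin_unique {cs : List Char} {r₁ r₂ : Int} (h₁ : pvIsMin cs r₁) (h₂ : pvIsMin cs r₂) :
    r₁ = r₂ := by
  obtain ⟨hle₁, hub₁, hach₁⟩ := h₁
  obtain ⟨hle₂, hub₂, hach₂⟩ := h₂
  have h12 : r₁ ≤ r₂ := by
    rcases hach₂ with h | ⟨i, j, hg, rfl⟩
    · omega
    · exact hub₁ i j hg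
  have h21 : r₂ ≤ r₁ := by
    rcases hach₁ with h | ⟨i, j, hg, rfl⟩
    · omega
    · exact hub₂ i j hg
  omega

-- window plumbing
lemma pvW_self (cs : List Char) (i : Nat) : pvW cs i i = [] := by
  simp [pvW]

lemma pvW_append (cs : List Char) {i j : Nat} (hij : i ≤ j) (hj : j < cs.length) :
    pvW cs i (j + 1) = pvW cs i j ++ [cs[j]] := by
  unfold pvW
  have h1 : j + 1 - i = (j - i) + 1 := by omega
  rw [h1, List.take_add_one]
  have h2 : (cs.drop i)[j - i]? = some cs[j] := by
    rw [List.getElem?_drop]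
    have e : i + (j - i) = j := by omega
    rw [e]
    exact List.getElem?_eq_getElem hj
  simp [h2]

lemma pvW_cons (cs : List Char) {l j : Nat} (hlj : l ≤ j) (hl : l < cs.length) :
    pvW cs l (j + 1) = cs[l] :: pvW cs (l + 1) (j + 1) := by
  unfold pvW
  rw [List.drop_eq_getElem_cons hl]
  have h1 : j + 1 - l = (j - l) + 1 := by omega
  have h2 : j + 1 - (l + 1) = j - l := by omega
  rw [h1, h2, List.take_succ_cons]

lemma pvW_drop (cs : List Char) {l i : Nat} (m : Nat) (hli : l ≤ i) :
    pvW cs i m = (pvW cs l m).drop (i - l) := by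
  unfold pvW
  rw [List.drop_take, List.drop_drop]
  have e1 : l + (i - l) = i := by omega
  have e2 : m - l - (i - l) = m - i := by omega
  rw [e1, e2]

lemma pvW_length (cs : List Char) {i m : Nat} (_him : i ≤ m) (hm : m ≤ cs.length) :
    (pvW cs i m).length = m - i := by
  unfold pvW
  simp [List.length_take, List.length_drop]
  omega

lemma pvW_getElem_mem (cs : List Char) {i k m : Nat} (hik : i ≤ k) (hkm : k < m)
    (_hm : m ≤ cs.length) (hk : k < cs.length) : cs[k] ∈ pvW cs i m := by
  unfold pvW
  have hlen : k - i < ((cs.drop i).take (m - i)).length := by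
    simp [List.length_take, List.length_drop]; omega
  have h : ((cs.drop i).take (m - i))[k - i]'hlen = cs[k] := by
    rw [List.getElem_take, List.getElem_drop]
    congr 1; omega
  rw [← h]; exact List.getElem_mem _

-- PySem.Set facts used by the ports
lemma pvSet_add_length (s : PySem.Set Char) (c : Char) :
    s.length ≤ (PySem.Set.add s c).length ∧ (PySem.Set.add s c).length ≤ s.length + 1 := by
  unfold PySem.Set.add; split <;> simp

lemma pvSet_ofList_append_singleton (l : List Char) (c : Char) :
    PySem.Set.ofList (l ++ [c]) = PySem.Set.add (PySem.Set.ofList l) c := by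
  simp [PySem.Set.ofList, List.foldl_append]

lemma pvSet_ofList_length_le (l : List Char) : (PySem.Set.ofList l).length ≤ l.length := by
  suffices h : ∀ (l : List Char) (s : PySem.Set Char), (l.foldl PySem.Set.add s).length ≤ s.length + l.length by
    simpa [PySem.Set.ofList, PySem.Set.empty] using h l []
  intro l
  induction l with
  | nil => simp
  | cons x xs ih =>
    intro s
    refine le_trans (ih (PySem.Set.add s x)) ?_
    have : (PySem.Set.add s x).length ≤ s.length + 1 := by
      unfold PySem.Set.add; split <;> simp
    simp only [List.length_cons]
    omega

lemma pvDst_mono {w₁ w₂ : List Char} (h : ∀ x ∈ w₁, x ∈ w₂) : pvDst w₁ ≤ pvDst w₂ := by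
  unfold pvDst
  have n1 := PySem.Set.nodup_ofList (pvLet w₁)
  have n2 := PySem.Set.nodup_ofList (pvLet w₂)
  rw [← List.toFinset_card_of_nodup n1, ← List.toFinset_card_of_nodup n2]
  apply Finset.card_le_card
  intro x hx
  simp only [List.mem_toFinset, PySem.Set.mem_ofList] at hx ⊢
  simp only [pvLet, List.mem_filter] at hx ⊢
  exact ⟨h x hx.1, hx.2⟩

lemma pvFilter_split (l : List Char) (p : Char → Bool) :
    (l.filter p).length + (l.filter (fun c => !p c)).length = l.length := by
  induction l with
  | nil => simp
  | cons x xs ih => by_cases hp : p x <;> simp [hp] <;> omega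

-- a good window is at least 6 characters long
lemma pvGood_len_ge_6 {cs : List Char} {i j : Nat} (hg : pvGood cs i j) :
    (6 : Int) ≤ (j : Int) - (i : Int) + 1 := by
  obtain ⟨hij, hj, _hall, hany, hdst⟩ := hg
  set w := pvW cs i (j + 1) with hw
  have hlen : w.length = j + 1 - i := pvW_length cs (by omega) (by omega)
  have h5 : 5 ≤ (pvLet w).length :=
    le_trans hdst (pvSet_ofList_length_le (pvLet w))
  have h1 : 1 ≤ (w.filter pvIsSym).length := by
    rw [List.any_eq_true] at hany
    obtain ⟨c, hc, hcs⟩ := hany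
    have : c ∈ w.filter pvIsSym := List.mem_filter.mpr ⟨hc, hcs⟩
    exact List.length_pos_of_mem this
  have hsplit := pvFilter_split w pvIsSym
  have : 6 ≤ w.length := by unfold pvLet at h5; omega
  omega

-- a good window stays witnessed when the left end moves further left (sym / distinct parts)
lemma pvGood_mono {cs : List Char} {i j l : Nat} (hg : pvGood cs i j) (hli : l ≤ i) :
    1 ≤ pvSymCnt (pvW cs l (j + 1)) ∧ 5 ≤ pvDst (pvW cs l (j + 1)) := by
  obtain ⟨hij, hj, _hall, hany, hdst⟩ := hg
  have hsub : ∀ x ∈ pvW cs i (j + 1), x ∈ pvW cs l (j + 1) := by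
    intro x hx
    rw [pvW_drop cs (j + 1) hli] at hx
    exact List.mem_of_mem_drop hx
  constructor
  · rw [List.any_eq_true] at hany
    obtain ⟨c, hc, hcs⟩ := hany
    have : c ∈ (pvW cs l (j + 1)).filter pvIsSym := List.mem_filter.mpr ⟨hsub c hc, hcs⟩
    have := List.length_pos_of_mem this
    unfold pvSymCnt
    omega
  · exact le_trans hdst (pvDst_mono hsub)

-- ===== A-side proof =====

lemma pvInnerA_state_set {cs : List Char} {i j : Nat} (hij : i ≤ j) (hj : j < cs.length) :
    (if !(PySem.Set.contains (PySem.Set.ofList (pvLet (pvW cs i j))) cs[j]) && !(PySem.Set.contains pvSymSet cs[j])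
      then PySem.Set.add (PySem.Set.ofList (pvLet (pvW cs i j))) cs[j]
      else PySem.Set.ofList (pvLet (pvW cs i j)))
    = PySem.Set.ofList (pvLet (pvW cs i (j + 1))) := by
  rw [pvW_append cs hij hj]
  by_cases hs : PySem.Set.contains pvSymSet cs[j]
  · have hm : cs[j] ∈ pvSymSet := by simpa [PySem.Set.contains] using hs
    simp [pvLet, List.filter_append, pvIsSym, hm]
  · have hm : cs[j] ∉ pvSymSet := by simpa [PySem.Set.contains] using hs
    have hlet : pvLet (pvW cs i j ++ [cs[j]]) = pvLet (pvW cs i j) ++ [cs[j]] := by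
      simp [pvLet, List.filter_append, pvIsSym, hm]
    rw [hlet, pvSet_ofList_append_singleton]
    by_cases hc : PySem.Set.contains (PySem.Set.ofList (pvLet (pvW cs i j))) cs[j]
    · have hmem : cs[j] ∈ pvLet (pvW cs i j) := by
        have : cs[j] ∈ PySem.Set.ofList (pvLet (pvW cs i j)) := by
          simpa [PySem.Set.contains] using hc
        exact (PySem.Set.mem_ofList _ _).mp this
      simp [PySem.Set.add, hm, hmem]
    · have hnmem : cs[j] ∉ pvLet (pvW cs i j) := by
        intro hmem
        exact hc (by simpa [PySem.Set.contains] using (PySem.Set.mem_ofList _ _).mpr hmem)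
      simp [PySem.Set.add, hm, hnmem]

lemma pvInnerA_spec (cs : List Char) (i : Nat) (p : Int) : ∀ (k j : Nat)
    (st : PySem.Set Char) (more5 onlyS sym : Bool),
    cs.length - j = k → i ≤ j →
    st = PySem.Set.ofList (pvLet (pvW cs i j)) →
    more5 = decide (5 ≤ st.length) →
    onlyS = (pvW cs i j).all pvAllowed →
    sym = (pvW cs i j).any pvIsSym →
    pvInnerA cs i p j st more5 onlyS sym ≤ p ∧
    (∀ j', j ≤ j' → pvGood cs i j' → pvInnerA cs i p j st more5 onlyS sym ≤ (j' : Int) - (i : Int) + 1) ∧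
    (pvInnerA cs i p j st more5 onlyS sym = p ∨
      ∃ j', j ≤ j' ∧ pvGood cs i j' ∧ pvInnerA cs i p j st more5 onlyS sym = (j' : Int) - (i : Int) + 1) := by
  intro k
  induction k with
  | zero =>
    intro j st more5 onlyS sym hk hij hst hm ho hs
    have hj : ¬ j < cs.length := by omega
    rw [pvInnerA]
    rw [dif_neg hj]
    refine ⟨le_rfl, ?_, Or.inl rfl⟩
    intro j' _ hg
    exact absurd hg.2.1 (by omega)
  | succ k ih =>
    intro j st more5 onlyS sym hk hij hst hm ho hs
    have hlt : j < cs.length := by omega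
    subst hst hm ho hs
    rw [pvInnerA]
    simp only [dif_pos hlt]
    by_cases hp : p ≤ (j : Int) - (i : Int) + 1
    · rw [if_pos hp]
      refine ⟨le_rfl, ?_, Or.inl rfl⟩
      intro j' hjj' hg
      have : (j : Int) - (i : Int) + 1 ≤ (j' : Int) - (i : Int) + 1 := by omega
      omega
    · rw [if_neg hp]
      rw [pvInnerA_state_set hij hlt]
      have hsym' : (if PySem.Set.contains pvSymSet cs[j] = true then true else (pvW cs i j).any pvIsSym)
          = (pvW cs i (j + 1)).any pvIsSym := by
        rw [pvW_append cs hij hlt, List.any_append]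
        have hone : [cs[j]].any pvIsSym = pvIsSym cs[j] := by simp
        rw [hone]
        unfold pvIsSym
        by_cases hs : PySem.Set.contains pvSymSet cs[j]
        · rw [hs, if_pos rfl, Bool.or_true]
        · have hs' : PySem.Set.contains pvSymSet cs[j] = false := by
            revert hs; cases PySem.Set.contains pvSymSet cs[j] <;> simp
          rw [hs', Bool.or_false, if_neg (by simp)]
      have honly' : (if (!(PySem.Chars.islower cs[j] || PySem.Set.contains pvSymSet cs[j])) = true
            then false else (pvW cs i j).all pvAllowed)
          = (pvW cs i (j + 1)).all pvAllowed := by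
        rw [pvW_append cs hij hlt, List.all_append]
        have hone : [cs[j]].all pvAllowed = pvAllowed cs[j] := by simp
        rw [hone]
        unfold pvAllowed
        by_cases ha : (PySem.Chars.islower cs[j] || PySem.Set.contains pvSymSet cs[j]) = true
        · rw [ha, Bool.and_true, if_neg (by simp)]
        · have ha' : (PySem.Chars.islower cs[j] || PySem.Set.contains pvSymSet cs[j]) = false := by
            revert ha; cases (PySem.Chars.islower cs[j] || PySem.Set.contains pvSymSet cs[j]) <;> simp
          rw [ha', Bool.and_false, if_pos (by simp)]
      have hlen_le : (PySem.Set.ofList (pvLet (pvW cs i j))).length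
          ≤ (PySem.Set.ofList (pvLet (pvW cs i (j + 1)))).length := by
        rw [← pvInnerA_state_set hij hlt]
        split
        · exact (pvSet_add_length _ _).1
        · exact le_rfl
      have hmore' : (if 5 ≤ (PySem.Set.ofList (pvLet (pvW cs i (j + 1)))).length then true
            else decide (5 ≤ (PySem.Set.ofList (pvLet (pvW cs i j))).length))
          = decide (5 ≤ (PySem.Set.ofList (pvLet (pvW cs i (j + 1)))).length) := by
        by_cases h5 : 5 ≤ (PySem.Set.ofList (pvLet (pvW cs i (j + 1)))).length
        · simp [h5]
        · simp only [if_neg h5]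
          simp only [decide_eq_decide]
          omega
      rw [hsym', honly', hmore']
      have hboolgood : ((pvW cs i (j + 1)).any pvIsSym && (pvW cs i (j + 1)).all pvAllowed &&
            decide (5 ≤ (PySem.Set.ofList (pvLet (pvW cs i (j + 1)))).length)) = true
          ↔ pvGood cs i j := by
        unfold pvGood pvDst
        simp only [Bool.and_eq_true, decide_eq_true_eq]
        constructor
        · rintro ⟨⟨h1, h2⟩, h3⟩
          exact ⟨hij, hlt, h2, h1, h3⟩
        · rintro ⟨-, -, h2, h1, h3⟩
          exact ⟨⟨h1, h2⟩, h3⟩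
      by_cases hg : pvGood cs i j
      · rw [if_pos (hboolgood.mpr hg)]
        refine ⟨min_le_left _ _, ?_, Or.inr ⟨j, le_rfl, hg, ?_⟩⟩
        · intro j' hjj' _
          have h1 : min p ((j : Int) - (i : Int) + 1) ≤ (j : Int) - (i : Int) + 1 := min_le_right _ _
          have : (j : Int) ≤ (j' : Int) := by exact_mod_cast hjj'
          omega
        · have : (j : Int) - (i : Int) + 1 ≤ p := by omega
          exact min_eq_right this
      · rw [if_neg (by simpa [hboolgood] using hg)]
        have hrec := ih (j + 1) (PySem.Set.ofList (pvLet (pvW cs i (j + 1))))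
          (decide (5 ≤ (PySem.Set.ofList (pvLet (pvW cs i (j + 1)))).length))
          ((pvW cs i (j + 1)).all pvAllowed) ((pvW cs i (j + 1)).any pvIsSym)
          (by omega) (by omega) rfl rfl rfl rfl
        obtain ⟨ha, hb, hc⟩ := hrec
        refine ⟨ha, ?_, ?_⟩
        · intro j' hjj' hgj'
          rcases Nat.eq_or_lt_of_le hjj' with rfl | hlt'
          · exact absurd hgj' hg
          · exact hb j' (by omega) hgj'
        · rcases hc with h | ⟨j', hjj', hgj', heq⟩
          · exact Or.inl h
          · exact Or.inr ⟨j', by omega, hgj', heq⟩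

lemma pvOuterA_spec : ∀ (k : Nat) (cs : List Char) (p : Int) (i : Nat),
    cs.length - i = k → 6 ≤ p → p ≤ 1000000 →
    (∀ i' j', i' < i → pvGood cs i' j' → p ≤ (j' : Int) - (i' : Int) + 1) →
    pvAch cs p →
    pvIsMin cs (pvOuterA cs p i) := by
  intro k
  induction k with
  | zero =>
    intro cs p i hk h6 hle hub hach
    have hi : ¬ i < cs.length := by omega
    rw [pvOuterA, if_neg hi]
    refine ⟨hle, ?_, hach⟩
    intro i' j' hg
    refine hub i' j' ?_ hg
    have h1 := hg.1
    have h2 := hg.2.1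
    omega
  | succ k ih =>
    intro cs p i hk h6 hle hub hach
    have hi : i < cs.length := by omega
    rw [pvOuterA, if_pos hi]
    by_cases h6' : (p == 6) = true
    · rw [if_pos h6']
      have hp6 : p = 6 := by exact_mod_cast beq_iff_eq.mp h6'
      refine ⟨by omega, ?_, hach⟩
      intro i' j' hg
      have := pvGood_len_ge_6 hg
      omega
    · rw [if_neg h6']
      have hk' : cs.length - (i + 1) = k := by omega
      have hinner := pvInnerA_spec cs i p (cs.length - i) i PySem.Set.empty false true false
        rfl le_rfl (by simp [pvW_self, pvLet, PySem.Set.ofList, PySem.Set.empty])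
        (by simp [PySem.Set.empty]) (by simp [pvW_self]) (by simp [pvW_self])
      obtain ⟨ha, hb, hc⟩ := hinner
      have h6q : 6 ≤ pvInnerA cs i p i PySem.Set.empty false true false := by
        rcases hc with hqp | ⟨j', _, hg, hq⟩
        · omega
        · have := pvGood_len_ge_6 hg
          omega
      have hubq : ∀ i' j', i' < i + 1 → pvGood cs i' j' →
          pvInnerA cs i p i PySem.Set.empty false true false ≤ (j' : Int) - (i' : Int) + 1 := by
        intro i' j' hi' hg
        rcases Nat.lt_or_ge i' i with h | h
        · have := hub i' j' h hg
          omega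
        · have hii : i' = i := by omega
          subst hii
          exact hb j' hg.1 hg
      have hachq : pvAch cs (pvInnerA cs i p i PySem.Set.empty false true false) := by
        rcases hc with hqp | ⟨j', _, hg, hq⟩
        · rw [hqp]; exact hach
        · exact Or.inr ⟨i, j', hg, hq⟩
      exact ih cs _ (i + 1) hk' h6q (le_trans ha hle) hubq hachq

lemma pvA_isMin (cs : List Char) : pvIsMin cs (pvOuterA cs 1000000 0) := by
  refine pvOuterA_spec cs.length cs 1000000 0 (by omega) (by norm_num) le_rfl ?_ (Or.inl rfl)
  intro i' j' h; omega

-- ===== B-side proof =====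

-- PySem.Dict.erase lookups (no library lemma covers erase)
lemma pvDict_get?_erase_self (d : PySem.Dict Char Int) (k : Char) :
    (d.erase k).get? k = none := by
  unfold PySem.Dict.erase PySem.Dict.get?
  cases hf : List.find? (fun p => p.1 == k) (List.filter (fun p => !p.1 == k) d.items) with
  | none => rfl
  | some a =>
    exfalso
    have h1 := List.find?_some hf
    have h2 := List.mem_of_find?_eq_some hf
    have h3 := List.of_mem_filter h2
    simp at h1 h3
    exact h3 h1

lemma pvDict_get?_erase_of_ne (d : PySem.Dict Char Int) {k k' : Char} (h : k' ≠ k) :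
    (d.erase k).get? k' = d.get? k' := by
  unfold PySem.Dict.erase PySem.Dict.get?
  congr 1
  induction d.items with
  | nil => rfl
  | cons p rest ih =>
    by_cases hp : (p.1 == k) = true
    · have hpk : p.1 = k := by simpa using hp
      have hne : (p.1 == k') = false := by
        rw [hpk]
        exact beq_eq_false_iff_ne.mpr (fun hh => h hh.symm)
      simp [hp, hne, ih]
    · have hp' : (p.1 == k) = false := by simpa using hp
      by_cases hm : (p.1 == k') = true <;>
        simp [hp', hm, ih]

lemma pvDict_keys_erase_nodup (d : PySem.Dict Char Int) (k : Char) (h : d.keys.Nodup) :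
    (d.erase k).keys.Nodup := by
  unfold PySem.Dict.erase PySem.Dict.keys at *
  exact (List.filter_sublist.map _).nodup h

-- the counter invariant B maintains for the current window
def pvDInv (counts : PySem.Dict Char Int) (w : List Char) : Prop :=
  counts.keys.Nodup ∧ (∀ c : Char, counts.getD c 0 = ((pvLet w).count c : Int)) ∧
    (∀ (c : Char) (v : Int), counts.get? c = some v → 1 ≤ v)

lemma pvDInv_empty : pvDInv PySem.Dict.empty [] := by
  refine ⟨?_, ?_, ?_⟩
  · simp [PySem.Dict.empty, PySem.Dict.keys]
  · intro c
    simp [PySem.Dict.empty, PySem.Dict.getD, PySem.Dict.get?, pvLet]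
  · intro c v hv
    simp [PySem.Dict.empty, PySem.Dict.get?] at hv

lemma pvDInv_size {counts : PySem.Dict Char Int} {w : List Char} (h : pvDInv counts w) :
    counts.size = pvDst w := by
  obtain ⟨hnd, hv, hp⟩ := h
  have hmem : ∀ c : Char, c ∈ counts.keys ↔ c ∈ PySem.Set.ofList (pvLet w) := by
    intro c
    rw [PySem.Set.mem_ofList]
    constructor
    · intro hc
      have hcont : counts.contains c = true := (PySem.Dict.contains_iff_mem_keys _ _).mpr hc
      cases hg : counts.get? c with
      | none =>
        rw [PySem.Dict.contains_eq_isSome_get?, hg] at hcont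
        simp at hcont
      | some v =>
        have h1 := hp c v hg
        have h2 : counts.getD c 0 = v := by simp [PySem.Dict.getD, hg]
        have h3 := hv c
        rw [h2] at h3
        have : 0 < (pvLet w).count c := by omega
        exact List.count_pos_iff.mp this
    · intro hc
      have hcnt : 0 < (pvLet w).count c := List.count_pos_iff.mpr hc
      cases hg : counts.get? c with
      | none =>
        have h2 : counts.getD c 0 = 0 := by simp [PySem.Dict.getD, hg]
        have h3 := hv c
        rw [h2] at h3
        omega
      | some v =>
        have hcont : counts.contains c = true := by
          rw [PySem.Dict.contains_eq_isSome_get?, hg]; rfl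
        exact (PySem.Dict.contains_iff_mem_keys _ _).mp hcont
  have h1 : counts.size = counts.keys.length := by
    simp [PySem.Dict.size, PySem.Dict.keys]
  unfold pvDst
  rw [h1, ← List.toFinset_card_of_nodup hnd,
    ← List.toFinset_card_of_nodup (PySem.Set.nodup_ofList (pvLet w))]
  congr 1
  apply Finset.ext
  intro c
  simpa using hmem c

lemma pvLet_cons (d : Char) (w : List Char) :
    pvLet (d :: w) = if pvIsSym d = true then pvLet w else d :: pvLet w := by
  by_cases hd : pvIsSym d = true <;> simp [pvLet, hd]

lemma pvLet_append (w : List Char) (c : Char) :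
    pvLet (w ++ [c]) = if pvIsSym c = true then pvLet w else pvLet w ++ [c] := by
  by_cases hc : pvIsSym c = true <;> simp [pvLet, List.filter_append, hc]

lemma pvSymCnt_cons (d : Char) (w : List Char) :
    pvSymCnt (d :: w) = (if pvIsSym d = true then 1 else 0) + pvSymCnt w := by
  by_cases hd : pvIsSym d = true
  · simp [pvSymCnt, hd]
    omega
  · simp [pvSymCnt, hd]

lemma pvSymCnt_append (w : List Char) (c : Char) :
    pvSymCnt (w ++ [c]) = pvSymCnt w + (if pvIsSym c = true then 1 else 0) := by
  by_cases hc : pvIsSym c = true <;> simp [pvSymCnt, List.filter_append, hc]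

lemma pvSymCnt_pos_any {w : List Char} (h : 1 ≤ pvSymCnt w) : w.any pvIsSym = true := by
  unfold pvSymCnt at h
  have hlen : 0 < (w.filter pvIsSym).length := by omega
  obtain ⟨c, hc⟩ := List.exists_mem_of_length_pos hlen
  rw [List.any_eq_true]
  exact ⟨c, List.mem_of_mem_filter hc, List.of_mem_filter hc⟩

lemma pvContains_of_getD_pos {counts : PySem.Dict Char Int} {d : Char}
    (h : 1 ≤ counts.getD d 0) : ∃ v, counts.get? d = some v ∧ counts.getD d 0 = v := by
  cases hg : counts.get? d with
  | none =>
    have : counts.getD d 0 = 0 := by simp [PySem.Dict.getD, hg]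
    omega
  | some v => exact ⟨v, rfl, by simp [PySem.Dict.getD, hg]⟩

lemma pvDInv_remove {counts : PySem.Dict Char Int} {d : Char} {w' : List Char}
    (h : pvDInv counts (d :: w')) (hd : pvIsSym d = false) :
    pvDInv (if (counts.insert d (counts.getD d 0 - 1)).getD d 0 == 0
            then (counts.insert d (counts.getD d 0 - 1)).erase d
            else counts.insert d (counts.getD d 0 - 1)) w' := by
  obtain ⟨hnd, hv, hp⟩ := h
  have hlet : pvLet (d :: w') = d :: pvLet w' := by simp [pvLet_cons, hd]
  have hvd : counts.getD d 0 = 1 + ((pvLet w').count d : Int) := by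
    have hh := hv d
    rw [hlet] at hh
    simp at hh
    omega
  have hvd1 : 1 ≤ counts.getD d 0 := by
    have : (0 : Int) ≤ ((pvLet w').count d : Int) := by positivity
    omega
  obtain ⟨v, hgv, hgvd⟩ := pvContains_of_getD_pos hvd1
  have hcont : counts.contains d = true := by
    rw [PySem.Dict.contains_eq_isSome_get?, hgv]; rfl
  have hnd1 : (counts.insert d (counts.getD d 0 - 1)).keys.Nodup := by
    rw [PySem.Dict.keys_insert_of_contains _ _ hcont]
    exact hnd
  have hgd1 : (counts.insert d (counts.getD d 0 - 1)).getD d 0 = counts.getD d 0 - 1 := by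
    rw [PySem.Dict.getD_eq_get?_getD, PySem.Dict.get?_insert_self]
    rfl
  have hvples : ∀ c : Char, c ≠ d →
      (counts.insert d (counts.getD d 0 - 1)).get? c = counts.get? c := by
    intro c hcd
    exact PySem.Dict.get?_insert_of_ne _ _ hcd
  have hcount_ne : ∀ c : Char, c ≠ d →
      ((pvLet (d :: w')).count c : Int) = ((pvLet w').count c : Int) := by
    intro c hcd
    have hdc : ¬ d = c := fun hh => hcd hh.symm
    rw [hlet, List.count_cons]
    simp [hdc]
  by_cases h0 : ((counts.insert d (counts.getD d 0 - 1)).getD d 0 == 0) = true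
  · rw [if_pos h0]
    have hz : counts.getD d 0 = 1 := by
      have := beq_iff_eq.mp h0
      omega
    refine ⟨pvDict_keys_erase_nodup _ _ hnd1, ?_, ?_⟩
    · intro c
      by_cases hcd : c = d
      · subst hcd
        rw [PySem.Dict.getD_eq_get?_getD, pvDict_get?_erase_self]
        simp
        omega
      · rw [PySem.Dict.getD_eq_get?_getD, pvDict_get?_erase_of_ne _ hcd, hvples c hcd,
          ← PySem.Dict.getD_eq_get?_getD, hv c]
        exact_mod_cast hcount_ne c hcd
    · intro c u hcu
      by_cases hcd : c = d
      · subst hcd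
        rw [pvDict_get?_erase_self] at hcu
        exact absurd hcu (by simp)
      · rw [pvDict_get?_erase_of_ne _ hcd, hvples c hcd] at hcu
        exact hp c u hcu
  · rw [if_neg h0]
    have hne1 : counts.getD d 0 - 1 ≠ 0 := by
      intro hh
      rw [hgd1] at h0
      exact h0 (by simpa using hh)
    refine ⟨hnd1, ?_, ?_⟩
    · intro c
      by_cases hcd : c = d
      · subst hcd
        rw [hgd1]
        omega
      · rw [PySem.Dict.getD_eq_get?_getD, hvples c hcd, ← PySem.Dict.getD_eq_get?_getD, hv c]
        exact_mod_cast hcount_ne c hcd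
    · intro c u hcu
      by_cases hcd : c = d
      · subst hcd
        rw [PySem.Dict.get?_insert_self] at hcu
        have hu : u = counts.getD c 0 - 1 := by
          simpa using hcu.symm
        subst hu
        omega
      · rw [hvples c hcd] at hcu
        exact hp c u hcu

lemma pvDInv_insert {counts : PySem.Dict Char Int} {w : List Char} {c : Char}
    (h : pvDInv counts w) (hc : pvIsSym c = false) :
    pvDInv (counts.insert c (counts.getD c 0 + 1)) (w ++ [c]) := by
  obtain ⟨hnd, hv, hp⟩ := h
  have hlet : pvLet (w ++ [c]) = pvLet w ++ [c] := by simp [pvLet_append, hc]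
  refine ⟨PySem.Dict.nodup_keys_insert _ _ _ hnd, ?_, ?_⟩
  · intro c'
    by_cases hcc : c' = c
    · subst hcc
      rw [PySem.Dict.getD_eq_get?_getD, PySem.Dict.get?_insert_self]
      rw [hlet, List.count_append]
      have := hv c'
      simp
      omega
    · rw [PySem.Dict.getD_eq_get?_getD, PySem.Dict.get?_insert_of_ne _ _ hcc,
        ← PySem.Dict.getD_eq_get?_getD, hv c', hlet, List.count_append]
      have hcc' : ¬ c = c' := fun hh => hcc hh.symm
      simp [hcc']
  · intro c' u hcu
    by_cases hcc : c' = c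
    · subst hcc
      rw [PySem.Dict.get?_insert_self] at hcu
      have hu : u = counts.getD c' 0 + 1 := by simpa using hcu.symm
      subst hu
      have : (0 : Int) ≤ counts.getD c' 0 := by
        rw [hv c']
        positivity
      omega
    · rw [PySem.Dict.get?_insert_of_ne _ _ hcc] at hcu
      exact hp c' u hcu

lemma pvShrinkB_spec : ∀ (fuel : Nat) (cs : List Char) (right : Nat) (best : Int) (left : Nat)
    (counts : PySem.Dict Char Int) (sym : Int),
    fuel = right + 1 - left → left ≤ right + 1 → right < cs.length →
    (pvW cs left (right + 1)).all pvAllowed = true →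
    pvDInv counts (pvW cs left (right + 1)) →
    sym = pvSymCnt (pvW cs left (right + 1)) →
    pvAch cs best →
    ∃ best' left' counts' sym',
      pvShrinkB cs right fuel best left counts sym = (best', left', counts', sym') ∧
      best' ≤ best ∧ left ≤ left' ∧ left' ≤ right + 1 ∧
      (pvW cs left' (right + 1)).all pvAllowed = true ∧
      pvDInv counts' (pvW cs left' (right + 1)) ∧
      sym' = pvSymCnt (pvW cs left' (right + 1)) ∧
      ¬(1 ≤ sym' ∧ 5 ≤ counts'.size) ∧
      (∀ l : Nat, left ≤ l → l < left' → best' ≤ (right : Int) - (l : Int) + 1) ∧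
      pvAch cs best' := by
  intro fuel
  induction fuel with
  | zero =>
    intro cs right best left counts sym hfu hle hrt hall hdi hsym hach
    have hleft : left = right + 1 := by omega
    subst hleft
    have hw0 : pvW cs (right + 1) (right + 1) = [] := pvW_self cs (right + 1)
    refine ⟨best, right + 1, counts, sym, rfl, le_rfl, le_rfl, le_rfl, hall, hdi, hsym,
      ?_, by intro l h1 h2; omega, hach⟩
    rintro ⟨h1, -⟩
    rw [hsym, hw0] at h1
    simp [pvSymCnt] at h1
  | succ fuel ih =>
    intro cs right best left counts sym hfu hle hrt hall hdi hsym hach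
    rw [pvShrinkB]
    by_cases hcond : 1 ≤ sym ∧ 5 ≤ counts.size
    · rw [if_pos hcond]
      have hlr : left ≤ right := by
        by_contra hcon
        have hleq : left = right + 1 := by omega
        subst hleq
        have h5 := hcond.2
        rw [pvDInv_size hdi, pvW_self] at h5
        simp [pvDst, pvLet, PySem.Set.ofList, PySem.Set.empty] at h5
      have hl : left < cs.length := by omega
      have hlw : pvW cs left (right + 1) = cs[left] :: pvW cs (left + 1) (right + 1) :=
        pvW_cons cs hlr hl
      have hd : cs.getD left 'a' = cs[left] := by
        rw [List.getD_eq_getElem?_getD, List.getElem?_eq_getElem hl]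
        rfl
      simp only [hd]
      have hgood : pvGood cs left right := by
        refine ⟨hlr, hrt, hall, ?_, ?_⟩
        · exact pvSymCnt_pos_any (by rw [← hsym]; exact hcond.1)
        · rw [← pvDInv_size hdi]
          exact hcond.2
      have hmin_le : min best ((right : Int) - (left : Int) + 1) ≤ (right : Int) - (left : Int) + 1 :=
        min_le_right _ _
      have hach' : pvAch cs (min best ((right : Int) - (left : Int) + 1)) := by
        rcases le_total best ((right : Int) - (left : Int) + 1) with h | h
        · rw [min_eq_left h]; exact hach
        · rw [min_eq_right h]; exact Or.inr ⟨left, right, hgood, rfl⟩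
      have hfu' : fuel = right + 1 - (left + 1) := by omega
      have hall' : (pvW cs (left + 1) (right + 1)).all pvAllowed = true := by
        rw [hlw, List.all_cons] at hall
        simp only [Bool.and_eq_true] at hall
        exact hall.2
      by_cases hds : PySem.Set.contains pvSymSet cs[left] = true
      · rw [if_pos hds]
        have hsymc : pvIsSym cs[left] = true := hds
        have hdi' : pvDInv counts (pvW cs (left + 1) (right + 1)) := by
          obtain ⟨a, b, c⟩ := hdi
          refine ⟨a, ?_, c⟩
          intro ch
          rw [b ch, hlw, pvLet_cons, if_pos hsymc]
        have hsym' : sym - 1 = pvSymCnt (pvW cs (left + 1) (right + 1)) := by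
          rw [hsym, hlw, pvSymCnt_cons, if_pos hsymc]
          omega
        obtain ⟨b', l', c', s', heq, hble, hlle, hlle', ha', hd', hs', hnc, hrec, hachf⟩ :=
          ih cs right (min best ((right : Int) - (left : Int) + 1)) (left + 1) counts (sym - 1)
            hfu' (by omega) hrt hall' hdi' hsym' hach'
        refine ⟨b', l', c', s', heq, le_trans hble (min_le_left _ _), by omega, hlle',
          ha', hd', hs', hnc, ?_, hachf⟩
        intro l hl1 hl2
        rcases Nat.eq_or_lt_of_le hl1 with rfl | hlt'
        · exact le_trans hble hmin_le
        · exact hrec l (by omega) hl2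
      · rw [if_neg hds]
        have hsymc : pvIsSym cs[left] = false := by
          revert hds
          unfold pvIsSym
          cases PySem.Set.contains pvSymSet cs[left] <;> simp
        have hdi0 : pvDInv counts (cs[left] :: pvW cs (left + 1) (right + 1)) := by
          rw [← hlw]; exact hdi
        have hdi' := pvDInv_remove hdi0 hsymc
        have hsym' : sym = pvSymCnt (pvW cs (left + 1) (right + 1)) := by
          rw [hsym, hlw, pvSymCnt_cons, if_neg (by simp [hsymc])]
          omega
        obtain ⟨b', l', c', s', heq, hble, hlle, hlle', ha', hd', hs', hnc, hrec, hachf⟩ :=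
          ih cs right (min best ((right : Int) - (left : Int) + 1)) (left + 1) _ sym
            hfu' (by omega) hrt hall' hdi' hsym' hach'
        refine ⟨b', l', c', s', heq, le_trans hble (min_le_left _ _), by omega, hlle',
          ha', hd', hs', hnc, ?_, hachf⟩
        intro l hl1 hl2
        rcases Nat.eq_or_lt_of_le hl1 with rfl | hlt'
        · exact le_trans hble hmin_le
        · exact hrec l (by omega) hl2
    · rw [if_neg hcond]
      exact ⟨best, left, counts, sym, rfl, le_rfl, le_rfl, hle, hall, hdi, hsym, hcond,
        by intro l h1 h2; omega, hach⟩

lemma pvScanB_spec : ∀ (k : Nat) (cs : List Char) (right : Nat) (best : Int) (left : Nat)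
    (counts : PySem.Dict Char Int) (sym : Int),
    cs.length - right = k → left ≤ right →
    (pvW cs left right).all pvAllowed = true →
    pvDInv counts (pvW cs left right) →
    sym = pvSymCnt (pvW cs left right) →
    best ≤ 1000000 →
    (∀ i j, pvGood cs i j → j + 1 ≤ right → best ≤ (j : Int) - (i : Int) + 1) →
    pvAch cs best →
    (∀ i j, i < left → i ≤ j → j < cs.length → (pvW cs i (j + 1)).all pvAllowed = true →
      right ≤ j + 1 → best ≤ (j : Int) - (i : Int) + 1) →
    pvIsMin cs (pvScanB cs right best left counts sym) := by
  intro k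
  induction k with
  | zero =>
    intro cs right best left counts sym hk hlr hall hdi hsym hb1 hb2 hach hQ
    have hnr : ¬ right < cs.length := by omega
    rw [pvScanB, dif_neg hnr]
    refine ⟨hb1, ?_, hach⟩
    intro i j hg
    exact hb2 i j hg (by have := hg.2.1; omega)
  | succ k ih =>
    intro cs right best left counts sym hk hlr hall hdi hsym hb1 hb2 hach hQ
    have hrt : right < cs.length := by omega
    rw [pvScanB]
    simp only [dif_pos hrt]
    by_cases hal : (PySem.Chars.islower cs[right] || PySem.Set.contains pvSymSet cs[right]) = true
    · rw [if_neg (by simp only [hal]; simp)]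
      have happ : pvW cs left (right + 1) = pvW cs left right ++ [cs[right]] :=
        pvW_append cs hlr hrt
      have hall1 : (pvW cs left (right + 1)).all pvAllowed = true := by
        rw [happ, List.all_append, hall]
        simp only [List.all_cons, List.all_nil, Bool.and_true, Bool.true_and]
        unfold pvAllowed
        rw [hal]
      -- common continuation after the shrink loop
      have hmain : ∀ (counts1 : PySem.Dict Char Int) (sym1 : Int),
          pvDInv counts1 (pvW cs left (right + 1)) →
          sym1 = pvSymCnt (pvW cs left (right + 1)) →
          pvIsMin cs (pvScanB cs (right + 1)
            (pvShrinkB cs right (right + 1 - left) best left counts1 sym1).1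
            (pvShrinkB cs right (right + 1 - left) best left counts1 sym1).2.1
            (pvShrinkB cs right (right + 1 - left) best left counts1 sym1).2.2.1
            (pvShrinkB cs right (right + 1 - left) best left counts1 sym1).2.2.2) := by
        intro counts1 sym1 hdi1 hsym1
        obtain ⟨b', l', c', s', heq, hble, hlle, hlle', ha', hd', hs', hnc, hrec, hachf⟩ :=
          pvShrinkB_spec (right + 1 - left) cs right best left counts1 sym1
            rfl (by omega) hrt hall1 hdi1 hsym1 hach
        rw [heq]
        have hb2' : ∀ i j, pvGood cs i j → j + 1 ≤ right + 1 → b' ≤ (j : Int) - (i : Int) + 1 := by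
          intro i j hg hj1
          rcases Nat.lt_or_ge (j + 1) (right + 1) with hjr | hjr
          · exact le_trans hble (hb2 i j hg (by omega))
          · have hj : j = right := by omega
            subst hj
            rcases Nat.lt_or_ge i left with hil | hil
            · refine le_trans hble (hQ i j hil hg.1 hg.2.1 hg.2.2.1 (by omega))
            · rcases Nat.lt_or_ge i l' with hil' | hil'
              · exact hrec i hil hil'
              · exfalso
                have hm := pvGood_mono hg hil'
                refine hnc ⟨?_, ?_⟩
                · rw [hs']; exact hm.1
                · rw [pvDInv_size hd']; exact hm.2
        have hQ' : ∀ i j, i < l' → i ≤ j → j < cs.length →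
            (pvW cs i (j + 1)).all pvAllowed = true → right + 1 ≤ j + 1 →
            b' ≤ (j : Int) - (i : Int) + 1 := by
          intro i j h1 h2 h3 h4 h5
          rcases Nat.lt_or_ge i left with hil | hil
          · exact le_trans hble (hQ i j hil h2 h3 h4 (by omega))
          · have := hrec i hil h1
            have hjr : (right : Int) ≤ (j : Int) := by exact_mod_cast Nat.le_of_succ_le_succ h5
            omega
        exact ih cs (right + 1) b' l' c' s' (by omega) hlle' ha' hd' hs'
          (le_trans hble hb1) hb2' hachf hQ'
      by_cases hds : PySem.Set.contains pvSymSet cs[right] = true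
      · rw [if_pos hds, if_pos hds]
        have hds' : pvIsSym cs[right] = true := hds
        refine hmain counts (sym + 1) ?_ ?_
        · obtain ⟨a, b, c⟩ := hdi
          refine ⟨a, ?_, c⟩
          intro ch
          rw [b ch, happ, pvLet_append, if_pos hds']
        · rw [happ, pvSymCnt_append, if_pos hds', hsym]
      · rw [if_neg hds, if_neg hds]
        have hsymc : pvIsSym cs[right] = false := by
          revert hds
          unfold pvIsSym
          cases PySem.Set.contains pvSymSet cs[right] <;> simp
        refine hmain (counts.insert cs[right] (counts.getD cs[right] 0 + 1)) sym ?_ ?_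
        · rw [happ]
          exact pvDInv_insert hdi hsymc
        · rw [happ, pvSymCnt_append, if_neg (by simp [hsymc]), hsym]
          omega
    · have hal' : (PySem.Chars.islower cs[right] || PySem.Set.contains pvSymSet cs[right]) = false := by
        revert hal
        cases (PySem.Chars.islower cs[right] || PySem.Set.contains pvSymSet cs[right]) <;> simp
      rw [if_pos (by simp only [hal']; simp)]
      have hbad : pvAllowed cs[right] = false := by
        unfold pvAllowed
        exact hal'
      have hnotallowed : ∀ i j, i ≤ right → right ≤ j → j < cs.length →
          (pvW cs i (j + 1)).all pvAllowed = true → False := by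
        intro i j h1 h2 h3 h4
        have hmem : cs[right] ∈ pvW cs i (j + 1) :=
          pvW_getElem_mem cs h1 (by omega) (by omega) hrt
        have := List.all_eq_true.mp h4 _ hmem
        rw [hbad] at this
        exact absurd this (by simp)
      refine ih cs (right + 1) best (right + 1) PySem.Dict.empty 0 (by omega) le_rfl
        (by rw [pvW_self]; rfl) (by rw [pvW_self]; exact pvDInv_empty)
        (by rw [pvW_self]; rfl) hb1 ?_ hach ?_
      · intro i j hg hj1
        rcases Nat.lt_or_ge (j + 1) (right + 1) with hjr | hjr
        · exact hb2 i j hg (by omega)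
        · have hj : j = right := by omega
          subst hj
          exact (hnotallowed i j hg.1 le_rfl hg.2.1 hg.2.2.1).elim
      · intro i j h1 h2 h3 h4 h5
        exact (hnotallowed i j (by omega) (by omega) h3 h4).elim

lemma pvB_isMin (cs : List Char) : pvIsMin cs (pvScanB cs 0 1000000 0 PySem.Dict.empty 0) := by
  refine pvScanB_spec cs.length cs 0 1000000 0 PySem.Dict.empty 0 (by omega) le_rfl ?_ ?_ ?_ le_rfl ?_ (Or.inl rfl) ?_
  · simp [pvW_self]
  · simpa [pvW_self] using pvDInv_empty
  · simp [pvW_self, pvSymCnt]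
  · intro i j _ h; omega
  · intro i j h; omega

-- ===== VERDICT (by name: the statement is the Claim_ definition above) =====
theorem search_min_pass_length_spec : Claim_equal_search_min_pass_length := by
  intro s _
  unfold Spec_search_min_pass_length search_min_pass_length search_min_pass_length_alt
  exact pvIsMin_unique (pvA_isMin s.toList) (pvB_isMin s.toList)
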